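-- pv_equiv track=rewrite | github.com/DigitalLifeYZQiu/Tslib-Workshop | utils/tools.py | find_segment_lengths
-- ===== SOURCE A (Python) =====
-- def find_segment_lengths(arr):
--     """
--     return the length of segment of 1s in arr
--     """
--     lengths = []
--     current_length = 0
--
--     for val in arr:
--         if val == 1:
--             current_length += 1
--         else:
--             if current_length > 0:
--                 lengths.append(current_length)
--                 current_length = 0
--
--     if current_length > 0:  # Add the last segment if necessary
--         lengths.append(current_length)
--
--     return lengths
-- ===== SOURCE B (Python) =====
-- from itertools import groupby
--
-- def find_segment_lengths(arr):
--     """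
--     return the length of segment of 1s in arr
--     """
--     return [sum(1 for _ in g) for k, g in groupby(arr) if k == 1]
-- ===== Notes on version B (the rewrite author's own statement) =====
-- stated objective: idiomatic
-- what changed: Replaces the manual counter/state-machine loop by itertools.groupby: group arr into maximal runs of equal elements and keep the lengths of the runs whose key equals 1.
import Mathlib
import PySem

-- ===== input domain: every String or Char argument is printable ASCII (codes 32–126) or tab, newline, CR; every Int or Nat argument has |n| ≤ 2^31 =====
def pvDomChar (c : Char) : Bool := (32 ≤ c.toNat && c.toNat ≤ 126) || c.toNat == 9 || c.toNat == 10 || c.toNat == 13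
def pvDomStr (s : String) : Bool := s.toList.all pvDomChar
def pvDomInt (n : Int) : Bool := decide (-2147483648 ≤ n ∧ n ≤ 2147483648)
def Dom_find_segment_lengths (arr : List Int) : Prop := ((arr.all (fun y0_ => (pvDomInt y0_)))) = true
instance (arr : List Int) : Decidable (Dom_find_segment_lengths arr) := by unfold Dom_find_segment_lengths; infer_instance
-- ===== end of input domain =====

-- B replaces A's manual counter/state-machine loop by a groupby decomposition:
-- split arr into maximal runs of equal elements, keep lengths of runs with key 1 (idiomatic; same cost).

-- ===== PORT A =====
-- the for-loop of A, threading (lengths, current_length); the trailing flush is the [] case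
def pvLoopA : List Int → List Int → Int → List Int
  | [], lengths, cur => if cur > 0 then lengths ++ [cur] else lengths
  | v :: vs, lengths, cur =>
    if v == 1 then pvLoopA vs lengths (cur + 1)
    else if cur > 0 then pvLoopA vs (lengths ++ [cur]) 0
    else pvLoopA vs lengths cur

def find_segment_lengths (arr : List Int) : List Int := pvLoopA arr [] 0

-- ===== PORT B =====
-- itertools.groupby: maximal runs of equal consecutive elements as (key, run length)
def pvRuns : List Int → List (Int × Int)
  | [] => []
  | x :: xs =>
    match pvRuns xs with
    | [] => [(x, 1)]
    | (k, n) :: rest => if x == k then (k, n + 1) :: rest else (x, 1) :: (k, n) :: rest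

-- the list comprehension: [length for key, length in runs if key == 1]
def find_segment_lengths_alt (arr : List Int) : List Int :=
  ((pvRuns arr).filter (fun p => p.1 == 1)).map (fun p => p.2)

-- ===== PRECONDITION & SPEC =====
def Spec_find_segment_lengths (arr : List Int) (out : List Int) : Prop := out = find_segment_lengths_alt arr
instance (arr : List Int) (out : List Int) : Decidable (Spec_find_segment_lengths arr out) := by unfold Spec_find_segment_lengths; infer_instance

-- ===== CLAIM (what is proved, stated in full; the proofs are below) =====
def Claim_equal_find_segment_lengths : Prop := ∀ (arr : List Int), Dom_find_segment_lengths arr → Spec_find_segment_lengths arr (find_segment_lengths arr)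

-- ===== LEMMAS AND PROOFS =====

-- proof-only: what the loop yields as a function of the run decomposition and the pending counter
def pvSpec (arr : List Int) (cur : Int) : List Int :=
  match pvRuns arr with
  | [] => if cur > 0 then [cur] else []
  | (k, n) :: rest =>
    if k = 1 then
      (if cur > 0 then (cur + n) else n) ::
        ((rest.filter (fun p => p.1 == 1)).map (fun p => p.2))
    else
      (if cur > 0 then [cur] else []) ++
        (((k, n) :: rest).filter (fun p => p.1 == 1)).map (fun p => p.2)

lemma pvLoopA_append (arr : List Int) : ∀ lengths cur,
    pvLoopA arr lengths cur = lengths ++ pvLoopA arr [] cur := by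
  induction arr with
  | nil =>
    intro lengths cur
    simp only [pvLoopA]
    split_ifs <;> simp
  | cons v vs ih =>
    intro lengths cur
    simp only [pvLoopA]
    split_ifs with h1 h2
    · rw [ih lengths, ih []]
    · rw [ih (lengths ++ [cur]), ih ([] ++ [cur])]; simp
    · rw [ih lengths, ih []]

lemma pvSpec_zero (arr : List Int) :
    pvSpec arr 0 = ((pvRuns arr).filter (fun p => p.1 == 1)).map (fun p => p.2) := by
  simp only [pvSpec]
  cases hr : pvRuns arr with
  | nil => simp
  | cons p rest =>
    obtain ⟨k, n⟩ := p
    by_cases hk : k = 1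
    · subst hk; simp [List.filter]
    · simp [List.filter, hk]

lemma pvLoopA_spec (arr : List Int) : ∀ cur, 0 ≤ cur →
    pvLoopA arr [] cur = pvSpec arr cur := by
  induction arr with
  | nil =>
    intro cur _
    simp [pvLoopA, pvSpec, pvRuns]
  | cons v vs ih =>
    intro cur hcur
    simp only [pvLoopA]
    by_cases hv : v = 1
    · simp only [hv, beq_self_eq_true, if_true]
      rw [ih (cur + 1) (by omega)]
      simp only [pvSpec, pvRuns]
      cases hr : pvRuns vs with
      | nil =>
        have h1 : cur + 1 > 0 := by omega
        by_cases h0 : cur > 0 <;> simp [h0, h1] <;> omega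
      | cons p rest =>
        obtain ⟨k, n⟩ := p
        by_cases hk : k = 1
        · subst hk
          simp only [beq_self_eq_true, if_true]
          have h1 : cur + 1 > 0 := by omega
          by_cases h0 : cur > 0 <;> simp [h0, h1] <;> omega
        · have hne : (1 : Int) ≠ k := fun h => hk h.symm
          simp only [beq_iff_eq, if_neg hne, if_neg hk]
          have h1 : cur + 1 > 0 := by omega
          by_cases h0 : cur > 0 <;> simp [h0, h1, List.filter, hk] <;> omega
    · have hvb : (v == 1) = false := by simp [hv]
      rw [hvb]
      simp only [Bool.false_eq_true, if_false]
      have hrhs : pvSpec (v :: vs) cur =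
          (if cur > 0 then [cur] else []) ++
            ((pvRuns vs).filter (fun p => p.1 == 1)).map (fun p => p.2) := by
        simp only [pvSpec, pvRuns]
        cases hr : pvRuns vs with
        | nil => simp [hv, List.filter, hvb]
        | cons p rest =>
          obtain ⟨k, n⟩ := p
          by_cases hvk : v = k
          · have hk : ¬ k = 1 := by rw [← hvk]; exact hv
            have hkb : (k == 1) = false := by simp [hk]
            simp [hvk, hk, hkb, List.filter]
          · have hvkb : (v == k) = false := by simp [hvk]
            simp only [hvkb, Bool.false_eq_true, if_false, if_neg hv]
            by_cases hk : k = 1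
            · subst hk; simp [List.filter, hvb]
            · simp [List.filter, hvb, hk]
      rw [hrhs]
      by_cases h0 : cur > 0
      · simp only [h0, if_true]
        rw [pvLoopA_append vs ([] ++ [cur]) 0, ih 0 le_rfl, pvSpec_zero]
        simp
      · have hc0 : cur = 0 := by omega
        subst hc0
        simp only [if_neg h0]
        rw [ih 0 le_rfl, pvSpec_zero]
        simp

-- ===== VERDICT (by name: the statement is the Claim_ definition above) =====
theorem find_segment_lengths_spec : Claim_equal_find_segment_lengths := by
  intro arr _
  show find_segment_lengths arr = find_segment_lengths_alt arr
  rw [find_segment_lengths, pvLoopA_spec arr 0 le_rfl, pvSpec_zero]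
  rfl
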